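-- pv_equiv track=rewrite | github.com/inhyeokjo/baekjoon_algorithm | pgms_64061.py | solution
-- ===== SOURCE A (Python) =====
-- def solution(board, moves):
--     basket = []
--     answer = 0
--     board = list(map(list, list(zip(*board))))
--     for i in board:
--         i.reverse()
--     board = [[j for j in i if j != 0] for i in board]
--
--     for move in moves:
--         move -= 1
--         if len(board[move]):
--             basket.append(board[move].pop())
--         if len(basket) >= 2 and basket[-1] == basket[-2]:
--             basket = basket[0:-2]
--             answer += 2
--     return answer
-- ===== SOURCE B (Python) =====
-- def solution(board, moves):
--     # Lazy per-column scanning: no transpose/reverse/filter preprocessing,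
--     # board is never rebuilt; a pointer per column tracks the next row to look at.
--     n = len(board)
--     ncols = len(board[0]) if board else 0
--     row_ptr = [0] * ncols
--     basket = []
--     answer = 0
--     for move in moves:
--         c = move - 1
--         r = row_ptr[c]
--         while r < n and board[r][c] == 0:
--             r += 1
--         if r < n:
--             doll = board[r][c]
--             row_ptr[c] = r + 1
--             if basket and basket[-1] == doll:
--                 basket.pop()
--                 answer += 2
--             else:
--                 basket.append(doll)
--     return answer
-- ===== Notes on version B (the rewrite author's own statement) =====
-- stated objective: faster
-- what changed: Replaces A's eager board rebuild (transpose + per-column reverse + zero-filter) and its basket[0:-2] copying with lazy top-down column scanning via a per-column row pointer and an O(1) push/pop basket stack.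
-- outside the precondition, e.g. on solution([[1, 2], [1]], [0, 0]): A returns 2, B returns 0
import Mathlib
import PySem

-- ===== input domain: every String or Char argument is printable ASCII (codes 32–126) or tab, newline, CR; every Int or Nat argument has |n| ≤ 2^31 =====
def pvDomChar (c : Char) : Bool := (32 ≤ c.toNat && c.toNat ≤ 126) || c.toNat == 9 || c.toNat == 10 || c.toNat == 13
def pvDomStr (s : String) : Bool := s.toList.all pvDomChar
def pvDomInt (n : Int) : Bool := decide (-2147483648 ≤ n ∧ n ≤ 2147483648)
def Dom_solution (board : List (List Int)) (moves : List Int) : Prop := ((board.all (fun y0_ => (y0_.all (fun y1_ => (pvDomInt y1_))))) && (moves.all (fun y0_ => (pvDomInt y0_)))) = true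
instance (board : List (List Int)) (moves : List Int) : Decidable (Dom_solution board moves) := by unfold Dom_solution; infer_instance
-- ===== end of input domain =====

-- B drops A's board rebuild (transpose + reverse + zero-filter) and basket slicing for lazy
-- per-column pointer scanning with an O(1) push/pop stack; equal return values on Pre_solution.

-- ===== PORT A =====
-- length of the shortest row: list(zip(*board)) truncates to it (0 for an empty board)
def pyMinLen (board : List (List Int)) : Nat := ((board.map List.length).min?).getD 0

-- exact port of list(map(list, zip(*board))): column c of the truncated transpose;
-- c < pyMinLen board ≤ every row's length, so getD never takes its default
def pyZipStar (board : List (List Int)) : List (List Int) :=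
  (List.range (pyMinLen board)).map (fun c => board.map (fun row => row.getD c 0))

-- one iteration of A's `for move in moves` loop over the state (board, basket, answer)
def stepA (s : List (List Int) × List Int × Int) (move : Int) : List (List Int) × List Int × Int :=
  let bd := s.1
  let basket := s.2.1
  let answer := s.2.2
  let m := move - 1                                     -- move -= 1
  match PySem.List.pyGet? bd m with                     -- board[move]; none = IndexError (outside Pre_)
  | none => (bd, basket, answer)
  | some colL =>
    -- if len(board[move]): basket.append(board[move].pop())
    let bd1 := if colL.length ≠ 0 then PySem.List.pySetD bd m colL.dropLast else bd
    let basket1 := if colL.length ≠ 0 then basket ++ [colL.getLast?.getD 0] else basket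
    -- if len(basket) >= 2 and basket[-1] == basket[-2]: basket = basket[0:-2]; answer += 2
    if 2 ≤ basket1.length ∧ PySem.List.pyGet? basket1 (-1) = PySem.List.pyGet? basket1 (-2)
    then (bd1, PySem.List.slice basket1 (some 0) (some (-2)), answer + 2)
    else (bd1, basket1, answer)

def solution (board : List (List Int)) (moves : List Int) : Int :=
  -- board = transpose; reverse each column; drop zeros
  let bd := ((pyZipStar board).map (fun i => i.reverse)).map (fun i => i.filter (fun j => j != 0))
  (moves.foldl stepA (bd, ([] : List Int), (0 : Int))).2.2

-- ===== PORT B =====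
-- board[r][c] of Source B (Python indexing in c); the default 0 is only reachable where Source B raises
def bCell (board : List (List Int)) (r : Nat) (c : Int) : Int :=
  (PySem.List.pyGet? (board.getD r []) c).getD 0

-- the `while r < n and board[r][c] == 0: r += 1` loop of Source B
def bSkip (board : List (List Int)) (c : Int) (r : Nat) : Nat :=
  if r < board.length then
    if bCell board r c = 0 then bSkip board c (r + 1) else r
  else r
termination_by board.length - r
decreasing_by omega

-- one iteration of Source B's loop over the state (row_ptr, basket, answer);
-- the basket stack is kept top-first (Source B pushes/pops at the end)
def bStep (board : List (List Int)) (s : List Nat × List Int × Int) (move : Int) :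
    List Nat × List Int × Int :=
  let ptr := s.1
  let basket := s.2.1
  let answer := s.2.2
  let c := move - 1
  match PySem.List.pyGet? ptr c with                    -- row_ptr[c]; none = IndexError (outside Pre_)
  | none => (ptr, basket, answer)
  | some p =>
    let r := bSkip board c p
    if r < board.length then
      let doll := bCell board r c                       -- board[r][c]
      let ptr1 := PySem.List.pySetD ptr c (r + 1)       -- row_ptr[c] = r + 1
      match basket with
      | t :: rest => if t = doll then (ptr1, rest, answer + 2)
                     else (ptr1, doll :: t :: rest, answer)
      | [] => (ptr1, [doll], answer)
    else (ptr, basket, answer)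

def solution_alt (board : List (List Int)) (moves : List Int) : Int :=
  -- row_ptr = [0] * (len(board[0]) if board else 0)
  (moves.foldl (bStep board) (List.replicate (board.headD []).length (0 : Nat),
                              ([] : List Int), (0 : Int))).2.2

-- ===== PRECONDITION & SPEC =====
-- Pre_ excludes moves whose 1-based column index lies outside every column (A raises IndexError)
-- and, on RAGGED boards only, non-positive moves: there A wraps Python's negative index into the
-- min-length-truncated transpose while B wraps it per row — both values are wraparound accidents.
def Pre_solution (board : List (List Int)) (moves : List Int) : Prop :=
  (moves ≠ [] → board ≠ []) ∧
  ((∀ m ∈ moves, 1 ≤ m ∧ ∀ row ∈ board, m ≤ (row.length : Int)) ∨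
   ((∀ row ∈ board, row.length = (board.headD []).length) ∧
    ∀ m ∈ moves, 1 - ((board.headD []).length : Int) ≤ m ∧ m ≤ ((board.headD []).length : Int)))
instance (board : List (List Int)) (moves : List Int) : Decidable (Pre_solution board moves) := by
  unfold Pre_solution; infer_instance

def pvWitness_solution : List (List Int) × List Int := ([[1], [1]], [1, 1])

def Spec_solution (board : List (List Int)) (moves : List Int) (out : Int) : Prop := out = solution_alt board moves
instance (board : List (List Int)) (moves : List Int) (out : Int) : Decidable (Spec_solution board moves out) := by unfold Spec_solution; infer_instance

-- ===== CLAIM (what is proved, stated in full; the proofs are below) =====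
def Claim_equal_solution : Prop := ∀ (board : List (List Int)) (moves : List Int), Dom_solution board moves → Pre_solution board moves → Spec_solution board moves (solution board moves)

-- ===== LEMMAS AND PROOFS =====

-- column c of the board, rows out of range / too short reading 0 (proof-only view)
def colFn (board : List (List Int)) (c : Nat) : List Int := board.map (fun row => row.getD c 0)

lemma entry_eq (board : List (List Int)) (c r : Nat) :
    (board.getD r []).getD c 0 = (colFn board c).getD r 0 := by
  simp only [colFn, List.getD_eq_getElem?_getD, List.getElem?_map]
  cases board[r]? <;> simp

-- Python index i into a list of length n lands on the plain index cn
def hits {α : Type} (l : List α) (i : Int) (cn : Nat) : Prop :=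
  cn < l.length ∧ ((0 ≤ i ∧ i = (cn : Int)) ∨ (i < 0 ∧ (l.length : Int) + i = (cn : Int)))

lemma pyIdx?_of_hits {α : Type} (l : List α) (i : Int) (cn : Nat) (h : hits l i cn) :
    PySem.List.pyIdx? l.length i = some cn := by
  obtain ⟨hcn, hidx⟩ := h
  rcases hidx with ⟨h0, he⟩ | ⟨h0, he⟩
  · rw [PySem.List.pyIdx?, if_pos h0, if_pos (by omega)]
    congr 1
    omega
  · rw [PySem.List.pyIdx?, if_neg (by omega), if_pos (by omega)]
    congr 1
    omega

lemma pyGet?_of_hits {α : Type} (l : List α) (i : Int) (cn : Nat) (h : hits l i cn) (d : α) :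
    PySem.List.pyGet? l i = some (l.getD cn d) := by
  rw [PySem.List.pyGet?, pyIdx?_of_hits l i cn h, Option.bind_some,
    List.getElem?_eq_getElem h.1, List.getD_eq_getElem?_getD, List.getElem?_eq_getElem h.1]
  rfl

lemma pySetD_of_hits {α : Type} (l : List α) (i : Int) (cn : Nat) (h : hits l i cn) (v : α) :
    PySem.List.pySetD l i v = l.set cn v := by
  rw [PySem.List.pySetD, PySem.List.pySet?, pyIdx?_of_hits l i cn h]
  rfl

-- Source B's board[r][c] agrees with column cn when c is a non-negative in-range index …
lemma pyGet?_nil {α : Type} (i : Int) : PySem.List.pyGet? ([] : List α) i = none := by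
  rw [PySem.List.pyGet?]
  cases PySem.List.pyIdx? ([] : List α).length i <;> simp

lemma cell_pos (board : List (List Int)) (cn : Nat) (hc : ∀ row ∈ board, cn < row.length) :
    ∀ r : Nat, bCell board r ((cn : Int)) = (colFn board cn).getD r 0 := by
  intro r
  by_cases hr : r < board.length
  · have hrow : board.getD r [] = board[r] := by
      rw [List.getD_eq_getElem?_getD, List.getElem?_eq_getElem hr]
      rfl
    have hmem : board[r] ∈ board := List.getElem_mem _
    rw [bCell, pyGet?_of_hits _ _ cn ⟨by rw [hrow]; exact hc _ hmem, Or.inl ⟨by omega, rfl⟩⟩ 0,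
      Option.getD_some, entry_eq]
  · have hrow : board.getD r [] = [] := by
      rw [List.getD_eq_getElem?_getD, List.getElem?_eq_none (by omega)]
      rfl
    rw [bCell, hrow]
    have : (colFn board cn).getD r 0 = 0 := by
      rw [List.getD_eq_getElem?_getD, List.getElem?_eq_none (by simp [colFn]; omega)]
      rfl
    rw [this, pyGet?_nil]
    rfl

-- … and, on a rectangular board, when c is a negative in-range index (Python wraparound)
lemma cell_neg (board : List (List Int)) (L : Nat) (hrect : ∀ row ∈ board, row.length = L)
    (i : Int) (h1 : i < 0) (h2 : 0 ≤ (L : Int) + i) :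
    ∀ r : Nat, bCell board r i = (colFn board ((L : Int) + i).toNat).getD r 0 := by
  intro r
  by_cases hr : r < board.length
  · have hrow : board.getD r [] = board[r] := by
      rw [List.getD_eq_getElem?_getD, List.getElem?_eq_getElem hr]
      rfl
    have hmem : board[r] ∈ board := List.getElem_mem _
    have hlenr : (board.getD r []).length = L := by rw [hrow]; exact hrect _ hmem
    rw [bCell, pyGet?_of_hits _ _ (((L : Int) + i).toNat)
      ⟨by omega, Or.inr ⟨h1, by rw [hlenr]; omega⟩⟩ 0, Option.getD_some, entry_eq]
  · have hrow : board.getD r [] = [] := by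
      rw [List.getD_eq_getElem?_getD, List.getElem?_eq_none (by omega)]
      rfl
    rw [bCell, hrow]
    have : (colFn board (((L : Int) + i).toNat)).getD r 0 = 0 := by
      rw [List.getD_eq_getElem?_getD, List.getElem?_eq_none (by simp [colFn]; omega)]
      rfl
    rw [this, pyGet?_nil]
    rfl

-- what the while-loop computes: the zero-filtered tail of column cn from row p onward is
-- empty iff the scan runs off the board, else headed by the entry the scan stops at
lemma bSkip_filter (board : List (List Int)) (c : Int) (cn : Nat)
    (hcells : ∀ r : Nat, bCell board r c = (colFn board cn).getD r 0) (p : Nat) :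
    ((colFn board cn).drop p).filter (fun j => j != 0) =
      if bSkip board c p < board.length then
        (colFn board cn).getD (bSkip board c p) 0 ::
          ((colFn board cn).drop (bSkip board c p + 1)).filter (fun j => j != 0)
      else [] := by
  have hlen : (colFn board cn).length = board.length := by simp [colFn]
  obtain ⟨k, hk⟩ : ∃ k, board.length - p ≤ k := ⟨board.length - p, le_refl _⟩
  induction k generalizing p with
  | zero =>
    have hp : board.length ≤ p := by omega
    rw [bSkip]
    simp only [if_neg (Nat.not_lt.mpr hp)]
    rw [List.drop_eq_nil_of_le (by omega)]
    simp
  | succ k ih =>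
    by_cases hp : p < board.length
    · have hdrop : (colFn board cn).drop p = (colFn board cn)[p] :: (colFn board cn).drop (p+1) :=
        List.drop_eq_getElem_cons (by omega)
      have hgetD : (colFn board cn).getD p 0 = (colFn board cn)[p]'(by omega) := by
        simp [List.getD_eq_getElem?_getD,
          List.getElem?_eq_getElem (by omega : p < (colFn board cn).length)]
      by_cases hz : bCell board p c = 0
      · rw [bSkip, if_pos hp, if_pos hz]
        have hz' : (colFn board cn)[p]'(by omega) = 0 := by
          rw [← hgetD, ← hcells]; exact hz
        rw [hdrop]
        rw [List.filter_cons_of_neg (by simp [hz'])]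
        exact ih (p+1) (by omega)
      · rw [bSkip, if_pos hp, if_neg hz]
        have hz' : (colFn board cn)[p]'(by omega) ≠ 0 := by
          rw [← hgetD, ← hcells]; exact hz
        rw [hdrop, List.filter_cons_of_pos (by simp [hz']), if_pos hp, hgetD]
    · rw [bSkip]
      simp only [if_neg hp]
      rw [List.drop_eq_nil_of_le (by omega)]
      simp

-- reverse-indexing facts for A's basket (end = top) vs B's basket (head = top)
lemma last2_neg_one (l : List Int) (y x : Int) :
    PySem.List.pyGet? (l ++ [y, x]) (-1) = some x := by
  rw [show l ++ [y, x] = (l ++ [y]) ++ [x] by simp, PySem.List.pyGet?_neg_one_append_singleton]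
lemma last2_neg_two (l : List Int) (y x : Int) :
    PySem.List.pyGet? (l ++ [y, x]) (-2) = some y := by
  rw [PySem.List.pyGet?_neg_ofNat _ 2 (by omega) (by simp)]
  have h2 : (l ++ [y, x]).length - 2 = l.length := by simp
  rw [h2, List.getElem?_append_right (le_refl _)]
  simp
lemma last2_slice (l : List Int) (y x : Int) :
    PySem.List.slice (l ++ [y, x]) (some 0) (some (-2)) = l := by
  rw [PySem.List.slice_zero_start, PySem.List.slice_to_neg_ofNat _ 2 (by omega)]
  have h2 : (l ++ [y, x]).length - 2 = l.length := by simp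
  rw [h2, List.take_left]
lemma getD_set_self {α : Type} (l : List α) (i : Nat) (v d : α) (h : i < l.length) :
    (l.set i v).getD i d = v := by
  simp [List.getD_eq_getElem?_getD, h]
lemma getD_set_ne {α : Type} (l : List α) (i j : Nat) (v d : α) (h : i ≠ j) :
    (l.set i v).getD j d = l.getD j d := by
  simp [List.getD_eq_getElem?_getD, h]

-- the loop invariant: A's rebuilt column state is the reversed zero-filtered tail of each
-- column below B's pointer, the baskets mirror each other, and the answers agree
lemma loop_eq (board : List (List Int)) (W L : Nat) :
    ∀ (ms : List Int) (bd : List (List Int)) (ptr : List Nat) (bB : List Int) (ans : Int),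
    (∀ m ∈ ms, ∃ cn : Nat, cn < W ∧ cn < L ∧
        ((0 ≤ m - 1 ∧ m - 1 = (cn : Int)) ∨ (m - 1 < 0 ∧ (W : Int) + (m - 1) = (cn : Int))) ∧
        ((0 ≤ m - 1 ∧ m - 1 = (cn : Int)) ∨ (m - 1 < 0 ∧ (L : Int) + (m - 1) = (cn : Int))) ∧
        (∀ r : Nat, bCell board r (m - 1) = (colFn board cn).getD r 0)) →
    bd.length = W →
    ptr.length = L →
    (∀ c : Nat, c < W →
        bd.getD c [] = (((colFn board c).drop (ptr.getD c 0)).filter (fun j => j != 0)).reverse) →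
    bB.IsChain (fun a b => a ≠ b) →
    (ms.foldl stepA (bd, bB.reverse, ans)).2.2 = (ms.foldl (bStep board) (ptr, bB, ans)).2.2 := by
  intro ms
  induction ms with
  | nil => intro bd ptr bB ans _ _ _ _ _; rfl
  | cons m ms ih =>
    intro bd ptr bB ans hmv hlen hptr hinv hch
    obtain ⟨cn, hcnW, hcnL, hidxW, hidxL, hcells⟩ := hmv m (by simp)
    have hmv' := fun m' (hm' : m' ∈ ms) => hmv m' (by simp [hm'])
    -- A reads board[move]
    have hgetA : PySem.List.pyGet? bd (m - 1) = some (bd.getD cn []) :=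
      pyGet?_of_hits bd (m - 1) cn ⟨by omega, by rw [hlen]; exact hidxW⟩ []
    -- B reads row_ptr[c]
    set p := ptr.getD cn 0 with hp
    have hhitsP : hits ptr (m - 1) cn := ⟨by omega, by rw [hptr]; exact hidxL⟩
    have hgetB : PySem.List.pyGet? ptr (m - 1) = some p := pyGet?_of_hits ptr (m - 1) cn hhitsP 0
    set r := bSkip board (m - 1) p with hr
    have hF := bSkip_filter board (m - 1) cn hcells p
    have hcol := hinv cn hcnW
    by_cases hrn : r < board.length
    · -- a doll is taken from column cn
      set d := (colFn board cn).getD r 0 with hd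
      set F' := ((colFn board cn).drop (r + 1)).filter (fun j => j != 0) with hF'
      rw [← hr, if_pos hrn] at hF
      have hcolL : bd.getD cn [] = F'.reverse ++ [d] := by
        rw [hcol, ← hp, hF]; simp
      have hlast : (bd.getD cn []).getLast?.getD 0 = d := by
        rw [hcolL, List.getLast?_concat]; rfl
      have hdropLast : (bd.getD cn []).dropLast = F'.reverse := by
        rw [hcolL, List.dropLast_concat]
      have hne : (bd.getD cn []).length ≠ 0 := by rw [hcolL]; simp
      have hsetA : PySem.List.pySetD bd (m - 1) (bd.getD cn []).dropLast = bd.set cn F'.reverse := by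
        rw [pySetD_of_hits bd (m - 1) cn ⟨by omega, by rw [hlen]; exact hidxW⟩, hdropLast]
      have hdoll : bCell board r (m - 1) = d := by rw [hcells r, hd]
      have hsetB : PySem.List.pySetD ptr (m - 1) (r + 1) = ptr.set cn (r + 1) :=
        pySetD_of_hits ptr (m - 1) cn hhitsP (r + 1)
      -- the invariant, restored after the move
      have hlen' : (bd.set cn F'.reverse).length = W := by simp [hlen]
      have hptr' : (ptr.set cn (r + 1)).length = L := by simp [hptr]
      have hinv' : ∀ c : Nat, c < W →
          (bd.set cn F'.reverse).getD c [] =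
            (((colFn board c).drop ((ptr.set cn (r + 1)).getD c 0)).filter
              (fun j => j != 0)).reverse := by
        intro c hcW
        by_cases hcc : cn = c
        · subst hcc
          rw [getD_set_self _ _ _ _ (by omega), getD_set_self _ _ _ _ (by omega), ← hF']
        · rw [getD_set_ne _ _ _ _ _ hcc, getD_set_ne _ _ _ _ _ hcc]
          exact hinv c hcW
      have hB0 : ∀ bk a, bStep board (ptr, bk, a) m =
          (ptr.set cn (r + 1),
            ((match bk with
              | t :: ts => if t = d then (ts, a + 2) else (d :: t :: ts, a)
              | [] => ([d], a)) : List Int × Int)) := by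
        intro bk a
        simp only [bStep, hgetB, ← hr, if_pos hrn, hdoll, hsetB]
        cases bk with
        | nil => rfl
        | cons t ts => by_cases hdt : t = d <;> simp [hdt]
      cases bB with
      | nil =>
        have hA : stepA (bd, ([] : List Int).reverse, ans) m =
            (bd.set cn F'.reverse, [d], ans) := by
          simp only [stepA, hgetA, if_pos hne, hsetA, hlast]
          have e : (([] : List Int)).reverse ++ [d] = [d] := by simp
          rw [e, if_neg (by simp)]
        rw [List.foldl_cons, List.foldl_cons, hA, hB0]
        exact ih _ _ [d] _ hmv' hlen' hptr' hinv' (List.isChain_singleton ..)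
      | cons t ts =>
        have e : (t :: ts).reverse ++ [d] = ts.reverse ++ [t, d] := by simp
        by_cases hdt : t = d
        · have hA : stepA (bd, (t :: ts).reverse, ans) m =
              (bd.set cn F'.reverse, ts.reverse, ans + 2) := by
            simp only [stepA, hgetA, if_pos hne, hsetA, hlast, e]
            rw [if_pos ⟨by simp, by rw [last2_neg_one, last2_neg_two, hdt]⟩, last2_slice]
          rw [List.foldl_cons, List.foldl_cons, hA, hB0]
          simp only [if_pos hdt]
          exact ih _ _ ts _ hmv' hlen' hptr' hinv' hch.tail
        · have hA : stepA (bd, (t :: ts).reverse, ans) m =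
              (bd.set cn F'.reverse, (d :: t :: ts).reverse, ans) := by
            simp only [stepA, hgetA, if_pos hne, hsetA, hlast, e]
            rw [if_neg (by
              rintro ⟨-, h2⟩
              rw [last2_neg_one, last2_neg_two] at h2
              exact hdt (by injection h2 with h3; exact h3.symm))]
            simp
          rw [List.foldl_cons, List.foldl_cons, hA, hB0]
          simp only [if_neg hdt]
          exact ih _ _ (d :: t :: ts) _ hmv' hlen' hptr' hinv'
            (List.isChain_cons_cons.mpr ⟨fun h => hdt h.symm, hch⟩)
    · -- column exhausted: both sides leave the state unchanged
      rw [← hr, if_neg hrn] at hF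
      have hcolnil : bd.getD cn [] = [] := by rw [hcol, ← hp, hF]; rfl
      have hno : ¬((([] : List Int)).length ≠ 0) := by simp
      have hA : stepA (bd, bB.reverse, ans) m = (bd, bB.reverse, ans) := by
        simp only [stepA, hgetA, hcolnil]
        rw [if_neg hno, if_neg hno]
        cases bB with
        | nil => rw [if_neg (by simp)]
        | cons x t =>
          cases t with
          | nil => rw [if_neg (by simp)]
          | cons y t2 =>
            have e2 : (x :: y :: t2).reverse = t2.reverse ++ [y, x] := by simp
            rw [e2, if_neg (by
              rintro ⟨-, h2⟩
              rw [last2_neg_one, last2_neg_two] at h2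
              exact (List.isChain_cons_cons.mp hch).1 (by injection h2))]
      have hB : bStep board (ptr, bB, ans) m = (ptr, bB, ans) := by
        simp only [bStep, hgetB, ← hr]
        rw [if_neg hrn]
      rw [List.foldl_cons, List.foldl_cons, hA, hB]
      exact ih bd ptr bB ans hmv' hlen hptr hinv hch

theorem solution_spec : Claim_equal_solution := by
  intro board moves _ hpre
  unfold Spec_solution solution solution_alt
  cases moves with
  | nil => rfl
  | cons m0 ms0 =>
    have hbne : board ≠ [] := hpre.1 (by simp)
    obtain ⟨w, hw⟩ : ∃ w, (board.map List.length).min? = some w := by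
      cases hmap : (board.map List.length).min? with
      | none => exact absurd (List.min?_eq_none_iff.mp hmap) (by simp [hbne])
      | some w => exact ⟨w, rfl⟩
    have hwiff := List.min?_eq_some_iff.mp hw
    have hWw : pyMinLen board = w := by rw [pyMinLen, hw]; rfl
    obtain ⟨r0, rest, rfl⟩ := List.exists_cons_of_ne_nil hbne
    set board := r0 :: rest
    have hhead : board.headD [] = r0 := rfl
    set L := r0.length with hL
    have hwL : w ≤ L := hwiff.2 r0.length (by simp [board])
    -- every move admitted by Pre_ lands on a plain column index below both W and L
    have hmv : ∀ mv ∈ (m0 :: ms0 : List Int), ∃ cn : Nat, cn < pyMinLen board ∧ cn < L ∧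
        ((0 ≤ mv - 1 ∧ mv - 1 = (cn : Int)) ∨
          (mv - 1 < 0 ∧ ((pyMinLen board : Int)) + (mv - 1) = (cn : Int))) ∧
        ((0 ≤ mv - 1 ∧ mv - 1 = (cn : Int)) ∨ (mv - 1 < 0 ∧ (L : Int) + (mv - 1) = (cn : Int))) ∧
        (∀ r : Nat, bCell board r (mv - 1) = (colFn board cn).getD r 0) := by
      intro mv hmem
      rcases hpre.2 with hpos | ⟨hrect, hneg⟩
      · obtain ⟨h1, h2⟩ := hpos mv hmem
        refine ⟨(mv - 1).toNat, ?_, ?_, Or.inl ⟨by omega, by omega⟩, Or.inl ⟨by omega, by omega⟩, ?_⟩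
        · obtain ⟨row, hrow, hrl⟩ := List.mem_map.mp hwiff.1
          have := h2 row hrow
          rw [hWw]
          omega
        · have := h2 r0 (by simp [board])
          omega
        · have hc : ∀ row ∈ board, (mv - 1).toNat < row.length := by
            intro row hrow
            have := h2 row hrow
            omega
          have he : mv - 1 = (((mv - 1).toNat : Nat) : Int) := by omega
          intro r
          rw [he]
          exact cell_pos board (mv - 1).toNat hc r
      · rw [hhead, ← hL] at hrect hneg
        have hWL : pyMinLen board = L := by
          obtain ⟨row, hrow, hrl⟩ := List.mem_map.mp hwiff.1
          rw [hWw, ← hrl, hrect row hrow]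
        obtain ⟨h1, h2⟩ := hneg mv hmem
        by_cases h0 : 0 ≤ mv - 1
        · refine ⟨(mv - 1).toNat, by omega, by omega,
            Or.inl ⟨h0, by omega⟩, Or.inl ⟨h0, by omega⟩, ?_⟩
          have hc : ∀ row ∈ board, (mv - 1).toNat < row.length := by
            intro row hrow
            rw [hrect row hrow]
            omega
          have he : mv - 1 = (((mv - 1).toNat : Nat) : Int) := by omega
          intro r
          rw [he]
          exact cell_pos board (mv - 1).toNat hc r
        · refine ⟨((L : Int) + (mv - 1)).toNat, by omega, by omega,
            Or.inr ⟨by omega, by omega⟩, Or.inr ⟨by omega, by omega⟩,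
            cell_neg board L hrect (mv - 1) (by omega) (by omega)⟩
    have hlen0 : (((pyZipStar board).map (fun i => i.reverse)).map
        (fun i => i.filter (fun j => j != 0))).length = pyMinLen board := by
      simp [pyZipStar]
    have hptr0 : (List.replicate (board.headD []).length (0 : Nat)).length = L := by
      rw [hhead, ← hL, List.length_replicate]
    have hrep : ∀ c : Nat, (List.replicate (board.headD []).length (0 : Nat)).getD c 0 = 0 := by
      intro c
      simp [List.getD_eq_getElem?_getD, List.getElem?_replicate]
      split <;> simp
    have hinv0 : ∀ c : Nat, c < pyMinLen board →
        (((pyZipStar board).map (fun i => i.reverse)).map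
          (fun i => i.filter (fun j => j != 0))).getD c [] =
          (((colFn board c).drop
              ((List.replicate (board.headD []).length (0 : Nat)).getD c 0)).filter
            (fun j => j != 0)).reverse := by
      intro c hc
      rw [hrep c, List.drop_zero]
      simp only [pyZipStar, List.getD_eq_getElem?_getD, List.getElem?_map,
        List.getElem?_range hc, Option.map_some, Option.getD_some]
      rw [← List.filter_reverse]
      rfl
    have h := loop_eq board (pyMinLen board) L (m0 :: ms0)
      (((pyZipStar board).map (fun i => i.reverse)).map (fun i => i.filter (fun j => j != 0)))
      (List.replicate (board.headD []).length (0 : Nat)) [] 0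
      hmv hlen0 hptr0 hinv0 (by simp)
    simpa using h
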